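-- pv_equiv track=rewrite | github.com/GeonwooLee21/Coding-Everyday | Day35_next_permutation.py | is_last_permutation
-- ===== SOURCE A (Python) =====
-- def is_last_permutation(nums):
--     n = len(nums)
--
--     flag = True
--     for i in range(0, n-1):
--         if nums[i] < nums[i+1]:
--             flag = False
--             break
--
--     if flag:
--         return "It is last permutation"
--     else:
--         return "It is not last permutation"
-- ===== SOURCE B (Python) =====
-- def is_last_permutation(nums):
--     if nums == sorted(nums, reverse=True):
--         return "It is last permutation"
--     else:
--         return "It is not last permutation"
-- ===== Notes on version B (the rewrite author's own statement) =====
-- stated objective: simpler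
-- what changed: B replaces the indexed adjacent-pair scan with an early break by building sorted(nums, reverse=True) and comparing it wholesale to nums.
import Mathlib
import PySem

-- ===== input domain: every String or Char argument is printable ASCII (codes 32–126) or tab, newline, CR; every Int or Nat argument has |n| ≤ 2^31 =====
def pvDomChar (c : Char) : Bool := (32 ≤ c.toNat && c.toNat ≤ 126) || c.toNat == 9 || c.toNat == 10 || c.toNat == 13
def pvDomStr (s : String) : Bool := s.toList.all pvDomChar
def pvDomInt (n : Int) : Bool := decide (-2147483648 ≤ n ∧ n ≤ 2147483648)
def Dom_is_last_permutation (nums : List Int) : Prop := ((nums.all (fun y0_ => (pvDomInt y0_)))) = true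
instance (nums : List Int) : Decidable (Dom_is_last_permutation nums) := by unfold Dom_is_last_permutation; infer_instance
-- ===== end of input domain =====

-- B replaces A's indexed adjacent-pair scan (with early break) by sort-descending-and-compare; same result, simpler structure.

-- ===== PORT A =====
-- A's for-loop over i in range(0, n-1) comparing nums[i] < nums[i+1] with break,
-- transcribed as the obvious structural recursion over the same adjacent pairs.
def pvScanA : List Int → Bool
  | a :: b :: t => if a < b then false else pvScanA (b :: t)
  | _ => true

def is_last_permutation (nums : List Int) : String :=
  if pvScanA nums then "It is last permutation" else "It is not last permutation"

-- ===== PORT B =====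
def is_last_permutation_alt (nums : List Int) : String :=
  if nums = PySem.List.sorted nums (fun x => x) true then "It is last permutation"
  else "It is not last permutation"

-- ===== PRECONDITION & SPEC =====
def Spec_is_last_permutation (nums : List Int) (out : String) : Prop := out = is_last_permutation_alt nums
instance (nums : List Int) (out : String) : Decidable (Spec_is_last_permutation nums out) := by unfold Spec_is_last_permutation; infer_instance

-- ===== CLAIM (what is proved, stated in full; the proofs are below) =====
def Claim_equal_is_last_permutation : Prop := ∀ (nums : List Int), Dom_is_last_permutation nums → Spec_is_last_permutation nums (is_last_permutation nums)

-- ===== LEMMAS AND PROOFS =====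

theorem pvScanA_iff_chain' (xs : List Int) : pvScanA xs = true ↔ List.IsChain (fun a b => b ≤ a) xs := by
  match xs with
  | [] => simp [pvScanA]
  | [a] => simp [pvScanA]
  | a :: b :: t =>
    rw [List.isChain_cons_cons]
    constructor
    · intro h
      by_cases hab : a < b
      · rw [pvScanA, if_pos hab] at h
        exact absurd h (by simp)
      · rw [pvScanA, if_neg hab] at h
        exact ⟨by omega, (pvScanA_iff_chain' (b :: t)).1 h⟩
    · intro ⟨h1, h2⟩
      simp only [pvScanA]
      rw [if_neg (by omega)]
      exact (pvScanA_iff_chain' (b :: t)).2 h2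

theorem pvScanA_iff_sorted (xs : List Int) :
    pvScanA xs = true ↔ xs = PySem.List.sorted xs (fun x => x) true := by
  rw [pvScanA_iff_chain']
  constructor
  · intro h
    have hp : xs.Pairwise (fun a b => b ≤ a) :=
      List.isChain_iff_pairwise.mp h
    exact (PySem.List.sorted_rev_eq_self_of_pairwise xs (fun x => x) hp).symm
  · intro h
    have hp : (PySem.List.sorted xs (fun x => x) true).Pairwise (fun a b => b ≤ a) :=
      PySem.List.sorted_pairwise_rev xs (fun x => x)
    rw [← h] at hp
    exact List.isChain_iff_pairwise.mpr hp

-- ===== VERDICT (by name: the statement is the Claim_ definition above) =====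
theorem is_last_permutation_spec : Claim_equal_is_last_permutation := by
  intro nums _
  unfold Spec_is_last_permutation is_last_permutation is_last_permutation_alt
  by_cases h : pvScanA nums = true
  · rw [if_pos h, if_pos ((pvScanA_iff_sorted nums).1 h)]
  · rw [if_neg h, if_neg (fun hc => h ((pvScanA_iff_sorted nums).2 hc))]
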